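-- pv_equiv track=rewrite | github.com/HazemKhairat/LeetCode | 3751-total-waviness-of-numbers-in-range-i/3751-total-waviness-of-numbers-in-range-i.py | totalWaviness
-- ===== SOURCE A (Python) =====
-- def totalWaviness(num1: int, num2: int) -> int:
--
--     ans = 0
--     for num in range(num1, num2 + 1):
--         s = str(num)
--         for i in range(1, len(s) - 1):
--             prev, curr, nxt = int(s[i - 1]), int(s[i]), int(s[i + 1])
--             if (prev < curr > nxt) or (prev > curr < nxt):
--                 ans += 1
--
--     return ans
-- ===== SOURCE B (Python) =====
-- def totalWaviness(num1: int, num2: int) -> int: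
--     # Decade decomposition: over a full decade 10k..10k+9 the waviness of
--     # 10k+d is wav(k) plus an extremum at the last interior position, and the
--     # number of last digits d creating that extremum has a closed form from
--     # the last two digits of k (c = k%10, p = k//10%10): c if p<c, 9-c if p>c,
--     # else 0.  So S(a,b) trims a,b to decade boundaries, adds the closed-form
--     # counts for the k-row, and recurses on a range one tenth the size.
--     # Numbers with fewer than three digits have waviness 0, so clamp below 0.
--
--     def wav(n: int) -> int:
--         # per-number count, used only on the <=18 trimmed edge numbers per level
--         ds = []
--         while n > 0:
--             ds.append(n % 10)
--             n //= 10
--         return sum(1 for i in range(1, len(ds) - 1)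
--                    if ds[i - 1] < ds[i] > ds[i + 1] or ds[i - 1] > ds[i] < ds[i + 1])
--
--     def tcount(k: int) -> int:
--         # number of d in 0..9 with an extremum at (k//10%10, k%10, d); 0 if k<10
--         if k < 10:
--             return 0
--         c = k % 10
--         p = k // 10 % 10
--         if p < c:
--             return c
--         if p > c:
--             return 9 - c
--         return 0
--
--     def S(a: int, b: int) -> int:
--         # sum of waviness over [a, b], 0 <= a
--         t = 0
--         while a <= b and a % 10 != 0:
--             t += wav(a)
--             a += 1
--         while a <= b and b % 10 != 9:
--             t += wav(b)
--             b -= 1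
--         if a > b:
--             return t
--         ka, kb = a // 10, b // 10
--         for k in range(ka, kb + 1):
--             t += tcount(k)
--         return t + 10 * S(ka, kb)
--
--     return S(max(num1, 0), num2)
-- ===== Notes on version B (the rewrite author's own statement) =====
-- stated objective: faster
-- what changed: B replaces A's per-number digit scan over the whole range by a decade decomposition: it trims the range to decade boundaries, adds for each surviving k a closed-form count of last digits d that create an extremum at the last interior position of 10k+d, and recurses on the tenfold-smaller k-range; intended as faster (the advisory timing run measured ~36x median at the largest size; degenerate near-empty ranges show no speedup).
import Mathlib
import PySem

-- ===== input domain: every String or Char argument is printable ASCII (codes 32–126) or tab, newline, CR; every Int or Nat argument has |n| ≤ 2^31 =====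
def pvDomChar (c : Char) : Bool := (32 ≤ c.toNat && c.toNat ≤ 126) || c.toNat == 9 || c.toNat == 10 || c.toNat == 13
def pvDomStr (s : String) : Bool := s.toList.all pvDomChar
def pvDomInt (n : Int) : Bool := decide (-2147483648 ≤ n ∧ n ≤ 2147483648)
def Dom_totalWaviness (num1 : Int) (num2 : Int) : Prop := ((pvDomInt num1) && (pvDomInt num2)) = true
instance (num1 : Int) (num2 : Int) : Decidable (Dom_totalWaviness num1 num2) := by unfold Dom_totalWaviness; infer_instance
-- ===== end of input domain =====

-- B replaces A's per-number digit scan over the whole range by a decade decomposition: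
-- trim the range to decade boundaries, add a closed-form per-decade count of extrema at the
-- last interior position, and recurse on the tenfold-smaller range of decade prefixes
-- (objective: faster on large ranges; the advisory timing run measured ~36x median at its
-- largest size, with no speedup on degenerate near-empty ranges).

-- ===== PORT A =====
-- Strings are handled on the char-list side: str(num) is PySem.Int.toChars
-- ((PySem.Int.toStr num).toList = PySem.Int.toChars num), len/indexing are the
-- list-side primitives, and int(one-char string) is PySem.Int.ofChars? [c].
def totalWaviness (num1 : Int) (num2 : Int) : Int :=
  (PySem.List.pyRange num1 (num2 + 1) 1).foldl (fun ans num =>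
    let s := PySem.Int.toChars num
    (PySem.List.pyRange 1 (PySem.List.len s - 1) 1).foldl (fun ans i =>
      match PySem.List.pyGet? s (i - 1), PySem.List.pyGet? s i, PySem.List.pyGet? s (i + 1) with
      | some cp, some cc, some cn =>
        match PySem.Int.ofChars? [cp], PySem.Int.ofChars? [cc], PySem.Int.ofChars? [cn] with
        | some prev, some curr, some nxt =>
          if (prev < curr ∧ curr > nxt) ∨ (prev > curr ∧ curr < nxt) then ans + 1 else ans
        | _, _, _ => ans  -- int() raises ValueError here (the '-' sign char): excluded by Pre_
      | _, _, _ => ans    -- IndexError is unreachable: 1 ≤ i ≤ len s - 2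
    ) ans) 0

-- ===== PORT B =====
-- The while/recursion of Source B is ported with an explicit fuel argument (a plain
-- totality guard: the stated fuel is always sufficient, see the lemmas below).

-- Source B wav: collect the digits least-significant-first with a while loop …
def pvWavDigits : Nat → Int → List Int → List Int
  | 0, _, acc => acc
  | fuel + 1, n, acc =>
    if 0 < n then pvWavDigits fuel (PySem.Int.floordiv n 10) (acc ++ [PySem.Int.mod n 10])
    else acc

-- … then count the interior strict extrema of the digit list by index
def pvWavCount (ds : List Int) : Int :=
  ((PySem.List.pyRange 1 (PySem.List.len ds - 1) 1).map (fun i =>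
    if (PySem.List.pyGetD ds (i - 1) 0 < PySem.List.pyGetD ds i 0 ∧
          PySem.List.pyGetD ds i 0 > PySem.List.pyGetD ds (i + 1) 0) ∨
       (PySem.List.pyGetD ds (i - 1) 0 > PySem.List.pyGetD ds i 0 ∧
          PySem.List.pyGetD ds i 0 < PySem.List.pyGetD ds (i + 1) 0)
    then (1 : Int) else 0)).sum

def pvWav (n : Int) : Int := pvWavCount (pvWavDigits (n.toNat + 1) n [])

-- Source B tcount: closed-form number of last digits d creating an extremum at (k//10%10, k%10, d)
def pvTcount (k : Int) : Int :=
  if k < 10 then 0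
  else
    let c := PySem.Int.mod k 10
    let p := PySem.Int.mod (PySem.Int.floordiv k 10) 10
    if p < c then c else if p > c then 9 - c else 0

-- Source B S: first trim loop "while a <= b and a % 10 != 0"
def pvTrimLow : Nat → Int → Int → Int → Int × Int
  | 0, t, a, _ => (t, a)
  | fuel + 1, t, a, b =>
    if a ≤ b ∧ PySem.Int.mod a 10 ≠ 0 then pvTrimLow fuel (t + pvWav a) (a + 1) b
    else (t, a)

-- Source B S: second trim loop "while a <= b and b % 10 != 9"
def pvTrimHigh : Nat → Int → Int → Int → Int × Int
  | 0, t, _, b => (t, b)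
  | fuel + 1, t, a, b =>
    if a ≤ b ∧ PySem.Int.mod b 10 ≠ 9 then pvTrimHigh fuel (t + pvWav b) a (b - 1)
    else (t, b)

-- Source B S: trim, closed-form counts for the decade row, recurse on the prefixes
def pvS : Nat → Int → Int → Int
  | 0, _, _ => 0
  | fuel + 1, a, b =>
    let p := pvTrimLow (b + 1 - a).toNat 0 a b
    let q := pvTrimHigh (b + 1 - p.2).toNat p.1 p.2 b
    if p.2 > q.2 then q.1
    else
      let ka := PySem.Int.floordiv p.2 10
      let kb := PySem.Int.floordiv q.2 10
      ((PySem.List.pyRange ka (kb + 1) 1).foldl (fun t k => t + pvTcount k) q.1) +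
        10 * pvS fuel ka kb

def totalWaviness_alt (num1 : Int) (num2 : Int) : Int :=
  pvS (num2 + 1 - max num1 0).toNat (max num1 0) num2

-- ===== PRECONDITION & SPEC =====
-- Pre_ excludes exactly the inputs where A raises: a nonempty range containing a number
-- ≤ -10, whose str() starts with '-', so int(s[0]) raises ValueError in A's inner loop.
def Pre_totalWaviness (num1 : Int) (num2 : Int) : Prop := num2 < num1 ∨ -9 ≤ num1
instance (num1 : Int) (num2 : Int) : Decidable (Pre_totalWaviness num1 num2) := by
  unfold Pre_totalWaviness; infer_instance

def pvWitness_totalWaviness : Int × Int := (100, 132)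

def Spec_totalWaviness (num1 : Int) (num2 : Int) (out : Int) : Prop := out = totalWaviness_alt num1 num2
instance (num1 : Int) (num2 : Int) (out : Int) : Decidable (Spec_totalWaviness num1 num2 out) := by
  unfold Spec_totalWaviness; infer_instance

-- ===== CLAIM (what is proved, stated in full; the proofs are below) =====
def Claim_equal_totalWaviness : Prop := ∀ (num1 : Int) (num2 : Int), Dom_totalWaviness num1 num2 → Pre_totalWaviness num1 num2 → Spec_totalWaviness num1 num2 (totalWaviness num1 num2)

-- ===== LEMMAS AND PROOFS =====

-- the strict-local-extremum indicator both programs test (on Nat digits)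
def ind (a b c : Nat) : Int := if (a < b ∧ b > c) ∨ (a > b ∧ b < c) then 1 else 0

-- number of internal strict extrema of a (big-endian) digit list
def cnt3 : List Nat → Int
  | a :: b :: c :: r => ind a b c + cnt3 (b :: c :: r)
  | _ => 0

-- the same count read off a little-endian digit list
def cnt3R : List Nat → Int
  | x :: c :: p :: r => ind p c x + cnt3R (c :: p :: r)
  | _ => 0

-- the waviness of one number — the common mathematical middle of the two proofs
def W (n : Int) : Int := cnt3R (Nat.digits 10 n.natAbs)

-- the 0/1 value A's inner loop body adds at index i of char list s
def bInd (s : List Char) (i : Int) : Int :=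
  match PySem.List.pyGet? s (i - 1), PySem.List.pyGet? s i, PySem.List.pyGet? s (i + 1) with
  | some cp, some cc, some cn =>
    match PySem.Int.ofChars? [cp], PySem.Int.ofChars? [cc], PySem.Int.ofChars? [cn] with
    | some prev, some curr, some nxt =>
      if (prev < curr ∧ curr > nxt) ∨ (prev > curr ∧ curr < nxt) then 1 else 0
    | _, _, _ => 0
  | _, _, _ => 0

-- str(m) for m : Nat, in closed form
def myRepr (n : Nat) : List Char :=
  if n = 0 then ['0'] else (Nat.digits 10 n).reverse.map Nat.digitChar

lemma tdcCore : ∀ (f n : Nat) (acc : List Char), n < f →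
    Nat.toDigitsCore 10 f n acc = myRepr n ++ acc := by
  intro f
  induction f with
  | zero => intro n acc h; omega
  | succ f ih =>
    intro n acc h
    by_cases h0 : n / 10 = 0
    · have h10 : n < 10 := by omega
      simp only [Nat.toDigitsCore, h0, if_pos]
      by_cases hn : n = 0
      · subst hn
        simp only [myRepr, if_pos]
        rw [show ((0 % 10 : Nat)).digitChar = '0' from by decide]
        rfl
      · have : Nat.digits 10 n = [n] := by
          rw [Nat.digits_def' (by norm_num) (Nat.pos_of_ne_zero hn)]
          simp [Nat.mod_eq_of_lt h10, Nat.div_eq_of_lt h10]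
        simp [myRepr, hn, this, Nat.mod_eq_of_lt h10]
    · have hn : n ≠ 0 := by rintro rfl; simp at h0
      have hlt : n / 10 < n := Nat.div_lt_self (Nat.pos_of_ne_zero hn) (by norm_num)
      simp only [Nat.toDigitsCore, h0, reduceIte]
      rw [ih (n / 10) _ (by omega)]
      have : myRepr n = myRepr (n / 10) ++ [Nat.digitChar (n % 10)] := by
        simp only [myRepr, hn, h0, reduceIte]
        rw [Nat.digits_def' (by norm_num) (Nat.pos_of_ne_zero hn)]
        simp
      rw [this]; simp

lemma toDigits10 (m : Nat) : Nat.toDigits 10 m = myRepr m := by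
  have := tdcCore (m + 1) m [] (by omega)
  simpa [Nat.toDigits] using this

lemma ofChars_digitChar (d : Nat) (h : d < 10) :
    PySem.Int.ofChars? [Nat.digitChar d] = some (d : Int) := by
  interval_cases d <;> decide

-- A's inner loop body is "add bInd s i"
lemma bodyA_eq (s : List Char) :
    (fun (ans i : Int) =>
      match PySem.List.pyGet? s (i - 1), PySem.List.pyGet? s i, PySem.List.pyGet? s (i + 1) with
      | some cp, some cc, some cn =>
        match PySem.Int.ofChars? [cp], PySem.Int.ofChars? [cc], PySem.Int.ofChars? [cn] with
        | some prev, some curr, some nxt =>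
          if (prev < curr ∧ curr > nxt) ∨ (prev > curr ∧ curr < nxt) then ans + 1 else ans
        | _, _, _ => ans
      | _, _, _ => ans) = fun ans i => ans + bInd s i := by
  funext ans i
  simp only [bInd]
  rcases PySem.List.pyGet? s (i - 1) with _ | cp <;>
    rcases PySem.List.pyGet? s i with _ | cc <;>
    rcases PySem.List.pyGet? s (i + 1) with _ | cn <;> simp
  rcases PySem.Int.ofChars? [cp] with _ | p <;>
    rcases PySem.Int.ofChars? [cc] with _ | c <;>
    rcases PySem.Int.ofChars? [cn] with _ | x <;> simp
  split_ifs <;> ring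

lemma pyGet?_cons_shift (x : Char) (xs : List Char) (i : Int) (h : 1 ≤ i) :
    PySem.List.pyGet? (x :: xs) i = PySem.List.pyGet? xs (i - 1) := by
  have h1 : i = (((i - 1).toNat : Int)) + 1 := by omega
  rw [h1, PySem.List.pyGet?_cons_succ]
  congr 1
  omega

lemma bInd_cons (x : Char) (xs : List Char) (i : Int) (h : 2 ≤ i) :
    bInd (x :: xs) i = bInd xs (i - 1) := by
  simp only [bInd]
  rw [pyGet?_cons_shift x xs (i - 1) (by omega), pyGet?_cons_shift x xs i (by omega),
    pyGet?_cons_shift x xs (i + 1) (by omega)]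
  norm_num

lemma bInd_one (a b c : Nat) (r : List Char) (ha : a < 10) (hb : b < 10) (hc : c < 10) :
    bInd (Nat.digitChar a :: Nat.digitChar b :: Nat.digitChar c :: r) 1 = ind a b c := by
  simp only [bInd]
  rw [show ((1:Int) - 1) = 0 from by norm_num, PySem.List.pyGet?_zero_cons,
    show ((1:Int) + 1) = 2 from by norm_num,
    pyGet?_cons_shift _ _ 2 (by norm_num), pyGet?_cons_shift _ _ 1 (by norm_num),
    show ((2:Int) - 1) = 1 from by norm_num, show ((1:Int) - 1) = 0 from by norm_num,
    pyGet?_cons_shift _ _ 1 (by norm_num), show ((1:Int) - 1) = 0 from by norm_num,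
    PySem.List.pyGet?_zero_cons, PySem.List.pyGet?_zero_cons]
  simp only [ofChars_digitChar _ ha, ofChars_digitChar _ hb, ofChars_digitChar _ hc]
  simp only [ind]
  split_ifs <;> first | rfl | (exfalso; omega)

lemma Asum : ∀ (bs : List Nat), (∀ d ∈ bs, d < 10) →
    ((PySem.List.pyRange 1 ((bs.length : Int) - 1) 1).map (bInd (bs.map Nat.digitChar))).sum
      = cnt3 bs := by
  intro bs
  induction bs with
  | nil => intro _; simp [PySem.List.pyRange_one_eq_nil (by norm_num : (-1 : Int) ≤ 1), cnt3]
  | cons a t ih =>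
    intro hd
    match t with
    | [] => simp [PySem.List.pyRange_one_eq_nil (by norm_num : (0 : Int) ≤ 1), cnt3]
    | [b] => simp [PySem.List.pyRange_one_eq_nil (le_refl (1 : Int)), cnt3]
    | b :: c :: r =>
      have h1 : (1 : Int) < ((a :: b :: c :: r).length : Int) - 1 := by
        simp only [List.length_cons]; push_cast; omega
      rw [PySem.List.pyRange_one_cons h1, List.map_cons, List.sum_cons]
      have hb1 : bInd ((a :: b :: c :: r).map Nat.digitChar) 1 = ind a b c := by
        simp only [List.map_cons]
        exact bInd_one a b c _ (hd a (by simp)) (hd b (by simp)) (hd c (by simp))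
      rw [hb1, show (1 : Int) + 1 = 2 from by norm_num]
      have hshift :
          ((PySem.List.pyRange 2 (((a :: b :: c :: r).length : Int) - 1) 1).map
              (bInd ((a :: b :: c :: r).map Nat.digitChar))).sum
            = ((PySem.List.pyRange 1 (((b :: c :: r).length : Int) - 1) 1).map
              (bInd ((b :: c :: r).map Nat.digitChar))).sum := by
        rw [List.map_congr_left (fun i hi => by
          have h2 : 2 ≤ i := (PySem.List.mem_pyRange_one.mp hi).1
          show bInd ((a :: b :: c :: r).map Nat.digitChar) i
              = bInd ((b :: c :: r).map Nat.digitChar) (i - 1)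
          simp only [List.map_cons]
          exact bInd_cons _ _ i h2)]
        rw [PySem.List.pyRange_one, PySem.List.pyRange_one]
        simp only [List.map_map]
        have hlen : ((((a :: b :: c :: r).length : Int) - 1) - 2).toNat
            = ((((b :: c :: r).length : Int) - 1) - 1).toNat := by
          simp only [List.length_cons]; push_cast; omega
        rw [hlen]
        refine congrArg List.sum (List.map_congr_left (fun k _ => ?_))
        simp only [Function.comp]
        congr 1
        omega
      rw [hshift, ih (fun d hdm => hd d (by simp [hdm]))]
      show ind a b c + cnt3 (b :: c :: r) = cnt3 (a :: b :: c :: r)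
      rfl

lemma cnt3_append3 : ∀ (zs : List Nat) (a b c : Nat),
    cnt3 (zs ++ [a, b, c]) = cnt3 (zs ++ [a, b]) + ind a b c := by
  intro zs
  induction zs with
  | nil => intro a b c; simp [cnt3]; try ring
  | cons z t ih =>
    intro a b c
    match t with
    | [] => simp [cnt3]; try ring
    | [u] =>
      simp only [List.cons_append, List.nil_append] at ih ⊢
      simp only [cnt3]
      have := ih a b c
      simp only [cnt3] at this
      omega
    | u :: v :: w =>
      have := ih a b c
      simp only [List.cons_append] at this ⊢
      simp only [cnt3] at this ⊢
      omega

lemma cnt3R_rev : ∀ (l : List Nat), cnt3R l = cnt3 l.reverse := by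
  intro l
  induction l using cnt3R.induct with
  | case1 x c p r ih =>
    simp only [cnt3R, ih, List.reverse_cons]
    have e1 : r.reverse ++ [p] ++ [c] ++ [x] = r.reverse ++ [p, c, x] := by simp
    have e2 : r.reverse ++ [p] ++ [c] = r.reverse ++ [p, c] := by simp
    rw [e1, e2, cnt3_append3]
    ring
  | case2 l h1 =>
    match l with
    | [] => simp [cnt3R, cnt3]
    | [x] => simp [cnt3R, cnt3]
    | [x, y] => simp [cnt3R, cnt3]
    | x :: y :: z :: r => exact absurd rfl (h1 x y z r)

-- numbers below 100 in absolute value have no interior digit, hence waviness 0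
lemma W_small (n : Int) (h : n.natAbs < 100) : W n = 0 := by
  unfold W
  by_cases h0 : n.natAbs = 0
  · simp [h0, cnt3R]
  · rw [Nat.digits_def' (by norm_num : (1:Nat) < 10) (by omega)]
    by_cases h1 : n.natAbs / 10 = 0
    · simp [h1, cnt3R]
    · rw [Nat.digits_def' (by norm_num : (1:Nat) < 10) (by omega)]
      have : n.natAbs / 10 / 10 = 0 := by omega
      simp [this, cnt3R]

-- A's inner loop for one number equals W num, for every num ≥ -9
lemma inner_eq_W (num : Int) (h9 : -9 ≤ num) (ans : Int) :
    (PySem.List.pyRange 1 (PySem.List.len (PySem.Int.toChars num) - 1) 1).foldl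
      (fun ans i =>
        match PySem.List.pyGet? (PySem.Int.toChars num) (i - 1),
              PySem.List.pyGet? (PySem.Int.toChars num) i,
              PySem.List.pyGet? (PySem.Int.toChars num) (i + 1) with
        | some cp, some cc, some cn =>
          match PySem.Int.ofChars? [cp], PySem.Int.ofChars? [cc], PySem.Int.ofChars? [cn] with
          | some prev, some curr, some nxt =>
            if (prev < curr ∧ curr > nxt) ∨ (prev > curr ∧ curr < nxt) then ans + 1 else ans
          | _, _, _ => ans
        | _, _, _ => ans) ans
      = ans + W num := by
  rw [bodyA_eq (PySem.Int.toChars num), PySem.List.foldl_add]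
  congr 1
  rcases (by omega : num < 0 ∨ 0 ≤ num) with hneg | hpos
  · -- -9 ≤ num ≤ -1 : two chars, empty index range; W = 0 since natAbs < 10
    have hna : num.natAbs < 10 ∧ num.natAbs ≠ 0 := by omega
    have hs : PySem.Int.toChars num = ['-', Nat.digitChar num.natAbs] := by
      simp only [PySem.Int.toChars, if_pos hneg]
      rw [toDigits10]
      simp only [myRepr, hna.2, if_neg, not_false_iff]
      rw [Nat.digits_def' (by norm_num : (1:Nat) < 10) (by omega)]
      simp [Nat.mod_eq_of_lt hna.1, Nat.div_eq_of_lt hna.1]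
    rw [hs]
    have : PySem.List.len ['-', Nat.digitChar num.natAbs] - 1 = 1 := by
      simp [PySem.List.len_eq]
    rw [this, PySem.List.pyRange_one_eq_nil (le_refl (1:Int))]
    rw [W_small num (by omega)]
    rfl
  · have hch : PySem.Int.toChars num = Nat.toDigits 10 num.toNat := by
      simp [PySem.Int.toChars, not_lt.mpr hpos]
    rcases (by omega : num < 10 ∨ 10 ≤ num) with hlt | hge
    · -- 0 ≤ num ≤ 9 : one char, empty index range; W = 0
      have hna : num.toNat < 10 := by omega
      have hs1 : (Nat.toDigits 10 num.toNat).length = 1 := by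
        rw [toDigits10]
        by_cases h0 : num.toNat = 0
        · simp [myRepr, h0]
        · simp only [myRepr, h0, if_neg, not_false_iff]
          rw [Nat.digits_def' (by norm_num : (1:Nat) < 10) (by omega)]
          simp [Nat.div_eq_of_lt hna]
      rw [hch]
      have : PySem.List.len (Nat.toDigits 10 num.toNat) - 1 = 0 := by
        simp [PySem.List.len_eq, hs1]
      rw [this, PySem.List.pyRange_one_eq_nil (by norm_num : (0:Int) ≤ 1)]
      rw [W_small num (by omega)]
      rfl
    · -- num ≥ 10 : the real case
      set m := num.toNat with hm
      have hm10 : 10 ≤ m := by omega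
      have hm0 : m ≠ 0 := by omega
      set bs := (Nat.digits 10 m).reverse with hbs
      have hsb : Nat.toDigits 10 m = bs.map Nat.digitChar := by
        rw [toDigits10]; simp [myRepr, hm0, hbs]
      have hdlt : ∀ d ∈ bs, d < 10 := by
        intro d hd
        exact Nat.digits_lt_base (by norm_num) (List.mem_reverse.mp hd)
      have hlen : ((bs.map Nat.digitChar).length : Int) = (bs.length : Int) := by simp
      rw [hch, hsb]
      have := Asum bs hdlt
      rw [PySem.List.len_eq]
      rw [hlen, this]
      have hna : num.natAbs = m := by omega
      unfold W
      rw [hna, cnt3R_rev, hbs]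

-- A is the sum of W over the ascending range (under Pre_, nonempty case)
lemma A_eq_sum (num1 num2 : Int) (h9 : -9 ≤ num1) :
    totalWaviness num1 num2 = ((PySem.List.pyRange num1 (num2 + 1) 1).map W).sum := by
  unfold totalWaviness
  rw [PySem.List.foldl_congr_mem _ _ (fun ans num => ans + W num) 0
    (fun acc num hmem => by
      have h9' : -9 ≤ num := by
        have := (PySem.List.mem_pyRange_one.mp hmem).1; omega
      exact inner_eq_W num h9' acc)]
  rw [PySem.List.foldl_add]
  ring

-- ===== B-side lemmas =====

-- the indicator on Int digits, as Source B's wav tests it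
def indI (a b c : Int) : Int := if (a < b ∧ b > c) ∨ (a > b ∧ b < c) then 1 else 0

def cnt3I : List Int → Int
  | a :: b :: c :: r => indI a b c + cnt3I (b :: c :: r)
  | _ => 0

-- the digit-collecting loop produces the little-endian digits (as Ints)
lemma pvWavDigits_eq : ∀ (fuel m : Nat) (acc : List Int), m < fuel →
    pvWavDigits fuel (m : Int) acc = acc ++ (Nat.digits 10 m).map (fun d => (d : Int)) := by
  intro fuel
  induction fuel with
  | zero => intro m acc h; omega
  | succ f ih =>
    intro m acc h
    rw [pvWavDigits]
    by_cases h0 : m = 0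
    · simp [h0]
    · have hpos : (0:Int) < (m:Int) := by exact_mod_cast Nat.pos_of_ne_zero h0
      rw [if_pos hpos]
      have hdiv : PySem.Int.floordiv (m:Int) 10 = ((m / 10 : Nat) : Int) := by
        rw [PySem.Int.floordiv_eq_ediv_of_pos (by norm_num : (0:Int) < 10)]
        omega
      have hmod : PySem.Int.mod (m:Int) 10 = ((m % 10 : Nat) : Int) := by
        rw [PySem.Int.mod_eq_emod_of_pos (by norm_num : (0:Int) < 10)]
        omega
      have hlt : m / 10 < f := by
        have := Nat.div_lt_self (Nat.pos_of_ne_zero h0) (by norm_num : 1 < 10)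
        omega
      rw [hdiv, hmod, ih (m / 10) _ hlt]
      rw [Nat.digits_def' (by norm_num : (1:Nat) < 10) (Nat.pos_of_ne_zero h0)]
      simp

-- the 0/1 value Source B's wav adds at index i of the Int digit list
def dInd (ds : List Int) (i : Int) : Int :=
  if (PySem.List.pyGetD ds (i - 1) 0 < PySem.List.pyGetD ds i 0 ∧
        PySem.List.pyGetD ds i 0 > PySem.List.pyGetD ds (i + 1) 0) ∨
     (PySem.List.pyGetD ds (i - 1) 0 > PySem.List.pyGetD ds i 0 ∧
        PySem.List.pyGetD ds i 0 < PySem.List.pyGetD ds (i + 1) 0)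
  then (1 : Int) else 0

lemma pyGetD_cons_shift (x : Int) (xs : List Int) (i : Int) (h : 1 ≤ i) :
    PySem.List.pyGetD (x :: xs) i 0 = PySem.List.pyGetD xs (i - 1) 0 := by
  simp only [PySem.List.pyGetD]
  have h1 : i = (((i - 1).toNat : Int)) + 1 := by omega
  rw [h1, PySem.List.pyGet?_cons_succ]
  congr 2
  omega

lemma dInd_cons (x : Int) (xs : List Int) (i : Int) (h : 2 ≤ i) :
    dInd (x :: xs) i = dInd xs (i - 1) := by
  simp only [dInd]
  rw [pyGetD_cons_shift x xs (i - 1) (by omega), pyGetD_cons_shift x xs i (by omega),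
    pyGetD_cons_shift x xs (i + 1) (by omega)]
  norm_num

lemma dInd_one (a b c : Int) (r : List Int) :
    dInd (a :: b :: c :: r) 1 = indI a b c := by
  simp only [dInd, indI]
  rw [show ((1:Int) - 1) = 0 from by norm_num, show ((1:Int) + 1) = 2 from by norm_num]
  rw [PySem.List.pyGetD_zero_cons,
    pyGetD_cons_shift _ _ 2 (by norm_num), show ((2:Int) - 1) = 1 from by norm_num,
    pyGetD_cons_shift _ _ 1 (by norm_num), show ((1:Int) - 1) = 0 from by norm_num,
    PySem.List.pyGetD_zero_cons,
    pyGetD_cons_shift _ _ 1 (by norm_num), show ((1:Int) - 1) = 0 from by norm_num,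
    PySem.List.pyGetD_zero_cons]

-- Source B's index sum over an Int digit list is cnt3I
lemma Bsum : ∀ (ds : List Int),
    ((PySem.List.pyRange 1 ((ds.length : Int) - 1) 1).map (dInd ds)).sum = cnt3I ds := by
  intro ds
  induction ds with
  | nil => simp [PySem.List.pyRange_one_eq_nil (by norm_num : (-1 : Int) ≤ 1), cnt3I]
  | cons a t ih =>
    match t with
    | [] => simp [PySem.List.pyRange_one_eq_nil (by norm_num : (0 : Int) ≤ 1), cnt3I]
    | [b] => simp [PySem.List.pyRange_one_eq_nil (le_refl (1 : Int)), cnt3I]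
    | b :: c :: r =>
      have h1 : (1 : Int) < ((a :: b :: c :: r).length : Int) - 1 := by
        simp only [List.length_cons]; push_cast; omega
      rw [PySem.List.pyRange_one_cons h1, List.map_cons, List.sum_cons]
      rw [dInd_one a b c r, show (1 : Int) + 1 = 2 from by norm_num]
      have hshift :
          ((PySem.List.pyRange 2 (((a :: b :: c :: r).length : Int) - 1) 1).map
              (dInd (a :: b :: c :: r))).sum
            = ((PySem.List.pyRange 1 (((b :: c :: r).length : Int) - 1) 1).map
              (dInd (b :: c :: r))).sum := by
        rw [List.map_congr_left (fun i hi => by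
          have h2 : 2 ≤ i := (PySem.List.mem_pyRange_one.mp hi).1
          exact dInd_cons a (b :: c :: r) i h2)]
        rw [PySem.List.pyRange_one, PySem.List.pyRange_one]
        simp only [List.map_map]
        have hlen : ((((a :: b :: c :: r).length : Int) - 1) - 2).toNat
            = ((((b :: c :: r).length : Int) - 1) - 1).toNat := by
          simp only [List.length_cons]; push_cast; omega
        rw [hlen]
        refine congrArg List.sum (List.map_congr_left (fun k _ => ?_))
        simp only [Function.comp]
        congr 1
        omega
      rw [hshift, ih]
      show indI a b c + cnt3I (b :: c :: r) = cnt3I (a :: b :: c :: r)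
      rfl

-- counting forward on the little-endian Int list = cnt3R on the Nat digits
lemma cnt3I_map : ∀ (l : List Nat), cnt3I (l.map (fun d => (d : Int))) = cnt3R l := by
  intro l
  induction l using cnt3R.induct with
  | case1 x c p r ih =>
    show indI (x:Int) (c:Int) (p:Int) + cnt3I ((c :: p :: r).map (fun d => (d : Int)))
        = ind p c x + cnt3R (c :: p :: r)
    rw [ih]
    congr 1
    simp only [indI, ind]
    split_ifs with h1 h2 <;> first | rfl | (exfalso; omega)
  | case2 l h1 =>
    match l with
    | [] => simp [cnt3I, cnt3R]
    | [x] => simp [cnt3I, cnt3R]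
    | [x, y] => simp [cnt3I, cnt3R]
    | x :: y :: z :: r => exact absurd rfl (h1 x y z r)

lemma pvWavCount_eq (ds : List Int) : pvWavCount ds = cnt3I ds := by
  unfold pvWavCount
  rw [PySem.List.len_eq]
  exact Bsum ds

lemma pvWav_eq (n : Int) (h : 0 ≤ n) : pvWav n = W n := by
  obtain ⟨m, rfl⟩ : ∃ m : Nat, n = (m : Int) := ⟨n.toNat, by omega⟩
  unfold pvWav
  rw [pvWavCount_eq]
  have hds : pvWavDigits ((m:Int).toNat + 1) (m : Int) []
      = (Nat.digits 10 m).map (fun d => (d : Int)) := by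
    rw [show ((m:Int).toNat + 1) = m + 1 by omega, pvWavDigits_eq (m + 1) m [] (by omega)]
    exact List.nil_append _
  rw [hds, cnt3I_map]
  unfold W
  rw [Int.natAbs_natCast]

-- ===== the decade identity =====

-- sum of the extremum indicator over the ten last digits, in closed form
lemma ind_sum (p c : Nat) (hp : p < 10) (hc : c < 10) :
    ind p c 0 + ind p c 1 + ind p c 2 + ind p c 3 + ind p c 4 + ind p c 5
      + ind p c 6 + ind p c 7 + ind p c 8 + ind p c 9
      = (if (p:Int) < (c:Int) then (c:Int) else if (p:Int) > (c:Int) then 9 - (c:Int) else 0) := by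
  interval_cases p <;> interval_cases c <;> decide

-- appending one digit d to a number k ≥ 10 adds one extremum test at (k/10%10, k%10, d)
lemma W_step (k : Int) (d : Nat) (hk : 10 ≤ k) (hd : d < 10) :
    W (10 * k + (d : Int)) = W k + ind (k.natAbs / 10 % 10) (k.natAbs % 10) d := by
  unfold W
  have hna : (10 * k + (d : Int)).natAbs = 10 * k.natAbs + d := by omega
  rw [hna]
  rw [Nat.digits_def' (by norm_num : (1:Nat) < 10) (by omega)]
  have hmod : (10 * k.natAbs + d) % 10 = d := by omega
  have hdiv : (10 * k.natAbs + d) / 10 = k.natAbs := by omega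
  rw [hmod, hdiv]
  rw [Nat.digits_def' (by norm_num : (1:Nat) < 10) (by omega),
      Nat.digits_def' (by norm_num : (1:Nat) < 10) (by omega)]
  show cnt3R (d :: k.natAbs % 10 :: k.natAbs / 10 % 10 :: _) = _
  rw [cnt3R]
  ring

-- one full decade: Σ_{d=0}^{9} W (10k+d) = 10 * W k + pvTcount k   (k ≥ 0)
lemma decade (k : Int) (hk : 0 ≤ k) :
    ((PySem.List.pyRange (10 * k) (10 * k + 10) 1).map W).sum = 10 * W k + pvTcount k := by
  have hr : PySem.List.pyRange (10 * k) (10 * k + 10) 1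
      = [10*k, 10*k+1, 10*k+2, 10*k+3, 10*k+4, 10*k+5, 10*k+6, 10*k+7, 10*k+8, 10*k+9] := by
    rw [PySem.List.pyRange_one, show (10*k+10-(10*k)).toNat = 10 by omega,
      show List.range 10 = [0,1,2,3,4,5,6,7,8,9] from rfl]
    simp only [List.map_cons, List.map_nil]
    push_cast
    norm_num
  rw [hr]
  simp only [List.map_cons, List.map_nil, List.sum_cons, List.sum_nil]
  rcases (by omega : k = 0 ∨ (1 ≤ k ∧ k < 10) ∨ 10 ≤ k) with h0 | hsm | hbig
  · subst h0
    norm_num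
    rw [W_small 0 (by norm_num), W_small 1 (by norm_num), W_small 2 (by norm_num),
      W_small 3 (by norm_num), W_small 4 (by norm_num), W_small 5 (by norm_num),
      W_small 6 (by norm_num), W_small 7 (by norm_num), W_small 8 (by norm_num),
      W_small 9 (by norm_num)]
    norm_num [pvTcount]
  · -- 1 ≤ k ≤ 9 : every 10k+d is a 2-digit number, W = 0 on the decade and on k
    have z : ∀ j : Int, 0 ≤ j → j < 10 → W (10 * k + j) = 0 := fun j h1 h2 =>
      W_small _ (by omega)
    have z0 : W (10 * k) = 0 := by
      have := z 0 (by omega) (by omega)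
      simpa using this
    rw [z0, z 1 (by omega) (by omega), z 2 (by omega) (by omega), z 3 (by omega) (by omega),
      z 4 (by omega) (by omega), z 5 (by omega) (by omega), z 6 (by omega) (by omega),
      z 7 (by omega) (by omega), z 8 (by omega) (by omega), z 9 (by omega) (by omega)]
    rw [W_small k (by omega)]
    simp [pvTcount, if_pos hsm.2]
  · -- k ≥ 10
    have st : ∀ d : Nat, d < 10 → W (10 * k + (d:Int)) = W k + ind (k.natAbs / 10 % 10) (k.natAbs % 10) d :=
      fun d hd => W_step k d hbig hd
    have s0 : W (10 * k) = W k + ind (k.natAbs / 10 % 10) (k.natAbs % 10) 0 := by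
      have := st 0 (by omega)
      simpa using this
    rw [show (10*k + (9:Int)) = 10*k + ((9:Nat):Int) by norm_num, st 9 (by omega)]
    rw [show (10*k + (8:Int)) = 10*k + ((8:Nat):Int) by norm_num, st 8 (by omega)]
    rw [show (10*k + (7:Int)) = 10*k + ((7:Nat):Int) by norm_num, st 7 (by omega)]
    rw [show (10*k + (6:Int)) = 10*k + ((6:Nat):Int) by norm_num, st 6 (by omega)]
    rw [show (10*k + (5:Int)) = 10*k + ((5:Nat):Int) by norm_num, st 5 (by omega)]
    rw [show (10*k + (4:Int)) = 10*k + ((4:Nat):Int) by norm_num, st 4 (by omega)]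
    rw [show (10*k + (3:Int)) = 10*k + ((3:Nat):Int) by norm_num, st 3 (by omega)]
    rw [show (10*k + (2:Int)) = 10*k + ((2:Nat):Int) by norm_num, st 2 (by omega)]
    rw [show (10*k + (1:Int)) = 10*k + ((1:Nat):Int) by norm_num, st 1 (by omega)]
    rw [s0]
    have hts := ind_sum (k.natAbs / 10 % 10) (k.natAbs % 10) (by omega) (by omega)
    have htc : pvTcount k
        = (if ((k.natAbs / 10 % 10 : Nat):Int) < ((k.natAbs % 10 : Nat):Int)
           then ((k.natAbs % 10 : Nat):Int)
           else if ((k.natAbs / 10 % 10 : Nat):Int) > ((k.natAbs % 10 : Nat):Int)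
           then 9 - ((k.natAbs % 10 : Nat):Int) else 0) := by
      unfold pvTcount
      rw [if_neg (by omega : ¬ k < 10)]
      have hcm : PySem.Int.mod k 10 = ((k.natAbs % 10 : Nat):Int) := by
        rw [PySem.Int.mod_eq_emod_of_pos (by norm_num : (0:Int) < 10)]
        omega
      have hpm : PySem.Int.mod (PySem.Int.floordiv k 10) 10 = ((k.natAbs / 10 % 10 : Nat):Int) := by
        rw [PySem.Int.floordiv_eq_ediv_of_pos (by norm_num : (0:Int) < 10),
          PySem.Int.mod_eq_emod_of_pos (by norm_num : (0:Int) < 10)]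
        omega
      rw [hcm, hpm]
    rw [htc, ← hts]
    ring

-- the decade rows across a k-range
lemma decades : ∀ (n : Nat) (ka kb : Int), 0 ≤ ka → kb + 1 - ka = (n : Int) →
    ((PySem.List.pyRange (10 * ka) (10 * kb + 10) 1).map W).sum
      = ((PySem.List.pyRange ka (kb + 1) 1).map (fun k => 10 * W k + pvTcount k)).sum := by
  intro n
  induction n with
  | zero =>
    intro ka kb hka hn
    rw [PySem.List.pyRange_one_eq_nil (by omega : 10 * kb + 10 ≤ 10 * ka),
      PySem.List.pyRange_one_eq_nil (by omega : kb + 1 ≤ ka)]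
    simp
  | succ n ih =>
    intro ka kb hka hn
    have hle : ka ≤ kb := by omega
    rw [PySem.List.pyRange_one_succ_right hle, List.map_append, List.sum_append]
    rw [PySem.List.pyRange_one_append (10 * ka) (10 * kb) (10 * kb + 10)
      (by omega) (by omega)]
    rw [List.map_append, List.sum_append]
    have hkb0 : 0 ≤ kb := by omega
    rw [show 10 * kb + 10 = 10 * kb + 10 from rfl, decade kb hkb0]
    have := ih ka (kb - 1) hka (by omega)
    rw [show 10 * (kb - 1) + 10 = 10 * kb by ring, show kb - 1 + 1 = kb by ring] at this
    rw [this]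
    simp

-- ===== correctness of the trims and of pvS =====

lemma pvTrimLow_bounds : ∀ (fuel : Nat) (t a b : Int), (b + 1 - a).toNat ≤ fuel →
    a ≤ (pvTrimLow fuel t a b).2 ∧ (pvTrimLow fuel t a b).2 ≤ max a (b + 1) ∧
      ((pvTrimLow fuel t a b).2 ≤ b → PySem.Int.mod (pvTrimLow fuel t a b).2 10 = 0) := by
  intro fuel
  induction fuel with
  | zero =>
    intro t a b hf
    rw [show pvTrimLow 0 t a b = (t, a) from rfl]
    exact ⟨le_refl a, le_max_left _ _, fun hle => absurd hle (by omega)⟩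
  | succ f ih =>
    intro t a b hf
    rw [pvTrimLow]
    by_cases h : a ≤ b ∧ PySem.Int.mod a 10 ≠ 0
    · rw [if_pos h]
      obtain ⟨ih1, ih2, ih3⟩ := ih (t + pvWav a) (a + 1) b (by omega)
      exact ⟨by omega, by omega, ih3⟩
    · rw [if_neg h]
      exact ⟨le_refl a, le_max_left _ _, fun hle => by tauto⟩

lemma pvTrimHigh_bounds : ∀ (fuel : Nat) (t a b : Int), (b + 1 - a).toNat ≤ fuel →
    (pvTrimHigh fuel t a b).2 ≤ b ∧ min (a - 1) b ≤ (pvTrimHigh fuel t a b).2 ∧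
      (a ≤ (pvTrimHigh fuel t a b).2 → PySem.Int.mod (pvTrimHigh fuel t a b).2 10 = 9) := by
  intro fuel
  induction fuel with
  | zero =>
    intro t a b hf
    rw [show pvTrimHigh 0 t a b = (t, b) from rfl]
    exact ⟨le_refl b, by omega, fun hle => absurd hle (by omega)⟩
  | succ f ih =>
    intro t a b hf
    rw [pvTrimHigh]
    by_cases h : a ≤ b ∧ PySem.Int.mod b 10 ≠ 9
    · rw [if_pos h]
      obtain ⟨ih1, ih2, ih3⟩ := ih (t + pvWav b) a (b - 1) (by omega)
      exact ⟨by omega, by omega, ih3⟩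
    · rw [if_neg h]
      exact ⟨le_refl b, by omega, fun hle => by tauto⟩

lemma pvTrimLow_fst : ∀ (fuel : Nat) (t a b : Int), (b + 1 - a).toNat ≤ fuel → 0 ≤ a →
    (pvTrimLow fuel t a b).1
      = t + ((PySem.List.pyRange a (pvTrimLow fuel t a b).2 1).map W).sum := by
  intro fuel
  induction fuel with
  | zero =>
    intro t a b hf ha
    rw [show pvTrimLow 0 t a b = (t, a) from rfl]
    rw [PySem.List.pyRange_one_eq_nil (le_refl a)]
    simp
  | succ f ih =>
    intro t a b hf ha
    rw [pvTrimLow]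
    by_cases h : a ≤ b ∧ PySem.Int.mod a 10 ≠ 0
    · rw [if_pos h]
      rw [ih (t + pvWav a) (a + 1) b (by omega) (by omega)]
      have hlt : a < (pvTrimLow f (t + pvWav a) (a + 1) b).2 := by
        have := (pvTrimLow_bounds f (t + pvWav a) (a + 1) b (by omega)).1
        omega
      rw [PySem.List.pyRange_one_cons hlt, List.map_cons, List.sum_cons]
      rw [pvWav_eq a ha]
      ring
    · rw [if_neg h]
      rw [PySem.List.pyRange_one_eq_nil (le_refl a)]
      simp

lemma pvTrimHigh_fst : ∀ (fuel : Nat) (t a b : Int), (b + 1 - a).toNat ≤ fuel → 0 ≤ a →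
    (pvTrimHigh fuel t a b).1
      = t + ((PySem.List.pyRange ((pvTrimHigh fuel t a b).2 + 1) (b + 1) 1).map W).sum := by
  intro fuel
  induction fuel with
  | zero =>
    intro t a b hf ha
    rw [show pvTrimHigh 0 t a b = (t, b) from rfl]
    rw [PySem.List.pyRange_one_eq_nil (le_refl (b + 1))]
    simp
  | succ f ih =>
    intro t a b hf ha
    rw [pvTrimHigh]
    by_cases h : a ≤ b ∧ PySem.Int.mod b 10 ≠ 9
    · rw [if_pos h]
      rw [ih (t + pvWav b) a (b - 1) (by omega) ha]
      have hle : (pvTrimHigh f (t + pvWav b) a (b - 1)).2 ≤ b - 1 :=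
        (pvTrimHigh_bounds f (t + pvWav b) a (b - 1) (by omega)).1
      rw [PySem.List.pyRange_one_succ_right
        (by omega : (pvTrimHigh f (t + pvWav b) a (b - 1)).2 + 1 ≤ b)]
      rw [List.map_append, List.sum_append]
      rw [pvWav_eq b (by omega)]
      simp [show b - 1 + 1 = b by ring]
      ring
    · rw [if_neg h]
      rw [PySem.List.pyRange_one_eq_nil (le_refl (b + 1))]
      simp

-- pvS at successor fuel, with the local names written out
lemma pvS_unfold (f : Nat) (a b : Int) : pvS (f + 1) a b =
    (if (pvTrimLow (b + 1 - a).toNat 0 a b).2 > (pvTrimHigh (b + 1 - (pvTrimLow (b + 1 - a).toNat 0 a b).2).toNat (pvTrimLow (b + 1 - a).toNat 0 a b).1 (pvTrimLow (b + 1 - a).toNat 0 a b).2 b).2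
     then (pvTrimHigh (b + 1 - (pvTrimLow (b + 1 - a).toNat 0 a b).2).toNat (pvTrimLow (b + 1 - a).toNat 0 a b).1 (pvTrimLow (b + 1 - a).toNat 0 a b).2 b).1
     else ((PySem.List.pyRange (PySem.Int.floordiv (pvTrimLow (b + 1 - a).toNat 0 a b).2 10) ((PySem.Int.floordiv (pvTrimHigh (b + 1 - (pvTrimLow (b + 1 - a).toNat 0 a b).2).toNat (pvTrimLow (b + 1 - a).toNat 0 a b).1 (pvTrimLow (b + 1 - a).toNat 0 a b).2 b).2 10) + 1) 1).foldl (fun t k => t + pvTcount k) (pvTrimHigh (b + 1 - (pvTrimLow (b + 1 - a).toNat 0 a b).2).toNat (pvTrimLow (b + 1 - a).toNat 0 a b).1 (pvTrimLow (b + 1 - a).toNat 0 a b).2 b).1)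
          + 10 * pvS f (PySem.Int.floordiv (pvTrimLow (b + 1 - a).toNat 0 a b).2 10) (PySem.Int.floordiv (pvTrimHigh (b + 1 - (pvTrimLow (b + 1 - a).toNat 0 a b).2).toNat (pvTrimLow (b + 1 - a).toNat 0 a b).1 (pvTrimLow (b + 1 - a).toNat 0 a b).2 b).2 10)) := rfl

lemma pvS_spec : ∀ (fuel : Nat) (a b : Int), 0 ≤ a → b + 1 - a ≤ (fuel : Int) →
    pvS fuel a b = ((PySem.List.pyRange a (b + 1) 1).map W).sum := by
  intro fuel
  induction fuel with
  | zero =>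
    intro a b ha hn
    rw [show pvS 0 a b = 0 from rfl,
      PySem.List.pyRange_one_eq_nil (by omega : b + 1 ≤ a)]
    simp
  | succ f ih =>
    intro a b ha hn
    rw [pvS_unfold]
    have hL := pvTrimLow_bounds (b + 1 - a).toNat 0 a b (le_refl _)
    have hLf := pvTrimLow_fst (b + 1 - a).toNat 0 a b (le_refl _) ha
    set a' := (pvTrimLow (b + 1 - a).toNat 0 a b).2 with ha'
    set t1 := (pvTrimLow (b + 1 - a).toNat 0 a b).1 with ht1
    have hH := pvTrimHigh_bounds (b + 1 - a').toNat t1 a' b (le_refl _)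
    have hHf := pvTrimHigh_fst (b + 1 - a').toNat t1 a' b (le_refl _) (by omega)
    set b' := (pvTrimHigh (b + 1 - a').toNat t1 a' b).2 with hb'
    set t2 := (pvTrimHigh (b + 1 - a').toNat t1 a' b).1 with ht2
    by_cases hgt : a' > b'
    · rw [if_pos hgt]
      rcases (by omega : b < a ∨ a ≤ b) with hba | hab
      · -- empty input range: a' = a, b' = b, everything is empty
        have haa : a' = a := by
          rw [ha', show (b + 1 - a).toNat = 0 by omega]
          rfl
        rw [hHf, hLf]
        rw [haa, PySem.List.pyRange_one_eq_nil (le_refl a)]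
        have hbb : b' ≥ min (a - 1) b := by
          have := hH.2.1
          omega
        rw [PySem.List.pyRange_one_eq_nil (by omega : b + 1 ≤ b' + 1)]
        rw [PySem.List.pyRange_one_eq_nil (by omega : b + 1 ≤ a)]
        simp
      · -- the two trims met: b' = a' - 1 and the pieces concatenate to [a, b]
        have ha'b : a' ≤ b + 1 := by
          have := hL.2.1; omega
        have hb'ge : a' - 1 ≤ b' := by
          have := hH.2.1; omega
        have hbeq : b' = a' - 1 := by omega
        rw [hHf, hLf]
        rw [hbeq, show a' - 1 + 1 = a' by ring]
        rw [PySem.List.pyRange_one_append a a' (b + 1) hL.1 ha'b]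
        rw [List.map_append, List.sum_append]
        ring
    · rw [if_neg hgt]
      have hab' : a' ≤ b' := by omega
      have hb'le : b' ≤ b := hH.1
      have hab : a ≤ b := by
        have h1 := hL.1
        have h2 := hH.2.1
        omega
      have hm0 : PySem.Int.mod a' 10 = 0 := hL.2.2 (by omega)
      have hm9 : PySem.Int.mod b' 10 = 9 := hH.2.2 hab'
      rw [PySem.Int.mod_eq_emod_of_pos (by norm_num : (0:Int) < 10)] at hm0 hm9
      set ka := PySem.Int.floordiv a' 10 with hka
      set kb := PySem.Int.floordiv b' 10 with hkb
      have hkae : ka = a' / 10 := by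
        rw [hka, PySem.Int.floordiv_eq_ediv_of_pos (by norm_num : (0:Int) < 10)]
      have hkbe : kb = b' / 10 := by
        rw [hkb, PySem.Int.floordiv_eq_ediv_of_pos (by norm_num : (0:Int) < 10)]
      have ha'b : a' ≤ b + 1 := by
        have := hL.2.1; omega
      have ha'0 : 0 ≤ a' := by
        have := hL.1; omega
      have ha10 : a' = 10 * ka := by omega
      have hb10 : b' = 10 * kb + 9 := by omega
      have hka0 : 0 ≤ ka := by omega
      have hkakb : ka ≤ kb := by omega
      -- recursive call: the k-range is at least ten times shorter
      have hrec : pvS f ka kb = ((PySem.List.pyRange ka (kb + 1) 1).map W).sum :=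
        ih ka kb hka0 (by omega)
      rw [hrec]
      rw [PySem.List.foldl_add]
      -- decades
      have hdec := decades ((kb + 1 - ka).toNat) ka kb hka0 (by omega)
      rw [PySem.List.sum_map_add_int] at hdec
      rw [List.sum_map_mul_left] at hdec
      -- assemble the right side
      rw [PySem.List.pyRange_one_append a a' (b + 1) hL.1 (by omega)]
      rw [PySem.List.pyRange_one_append a' (b' + 1) (b + 1) (by omega) (by omega)]
      rw [List.map_append, List.sum_append, List.map_append, List.sum_append]
      rw [hHf, hLf]
      have hmid : ((PySem.List.pyRange a' (b' + 1) 1).map W).sum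
          = 10 * ((PySem.List.pyRange ka (kb + 1) 1).map W).sum
            + ((PySem.List.pyRange ka (kb + 1) 1).map pvTcount).sum := by
        rw [ha10, hb10, show 10 * kb + 9 + 1 = 10 * kb + 10 by ring]
        rw [hdec]
      rw [hmid]
      ring

-- B is the sum of W over [max(num1,0), num2]
lemma B_eq_sum (num1 num2 : Int) :
    totalWaviness_alt num1 num2
      = ((PySem.List.pyRange (max num1 0) (num2 + 1) 1).map W).sum := by
  unfold totalWaviness_alt
  exact pvS_spec (num2 + 1 - max num1 0).toNat (max num1 0) num2 (by omega) (by omega)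

-- ===== VERDICT (by name: the statement is the Claim_ definition above) =====
theorem totalWaviness_spec : Claim_equal_totalWaviness := by
  unfold Claim_equal_totalWaviness
  intro num1 num2 _ hpre
  unfold Spec_totalWaviness
  rw [B_eq_sum]
  rcases (by omega : num2 < num1 ∨ num1 ≤ num2) with hgt | hle
  · -- empty range on both sides
    unfold totalWaviness
    rw [PySem.List.pyRange_one_eq_nil (by omega : num2 + 1 ≤ num1)]
    rw [PySem.List.pyRange_one_eq_nil (by omega : num2 + 1 ≤ max num1 0)]
    simp
  · have h9 : -9 ≤ num1 := by
      rcases hpre with h | h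
      · omega
      · exact h
    rw [A_eq_sum num1 num2 h9]
    rcases (by omega : 0 ≤ num1 ∨ num1 < 0) with hp | hneg
    · rw [max_eq_left hp]
    · rw [max_eq_right (by omega : num1 ≤ 0)]
      rcases (by omega : num2 < 0 ∨ 0 ≤ num2) with hn2 | hp2
      · -- entirely negative: every term is W of a number in [-9,-1], i.e. 0
        rw [PySem.List.pyRange_one_eq_nil (by omega : num2 + 1 ≤ 0)]
        rw [List.map_congr_left (fun x hx => by
          have hm := PySem.List.mem_pyRange_one.mp hx
          show W x = (fun _ => (0:Int)) x
          exact W_small x (by omega))]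
        simp
      · -- split A's range at 0; the negative part sums to 0
        rw [PySem.List.pyRange_one_append num1 0 (num2 + 1) (by omega) (by omega)]
        rw [List.map_append, List.sum_append]
        rw [List.map_congr_left (fun x hx => by
          have hm := PySem.List.mem_pyRange_one.mp hx
          show W x = (fun _ => (0:Int)) x
          exact W_small x (by omega))]
        simp
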